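-- pv_equiv track=rewrite | github.com/Hao-OliverChen/AI_UTTT | stodWithoutA.py | extractMoveInfo
-- ===== SOURCE A (Python) =====
-- def extractMoveInfo(move_info):
--     space_counter = 0
--     teamname = ""
--     temp_arr = []
--     # get the team name and move
--     for char in move_info:
--         if char == " ":
--             space_counter+=1
--         elif space_counter == 0:
--             teamname = teamname + char
--         else:
--             temp_arr.append(char)
--     return  teamname,temp_arr
-- ===== SOURCE B (Python) =====
-- def extractMoveInfo(move_info):
--     before, _, rest = move_info.partition(" ")
--     return before, [c for c in rest if c != " "]
-- ===== Notes on version B (the rewrite author's own statement) =====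
-- stated objective: idiomatic
-- what changed: Replaced the counter-driven single loop that interleaves teamname building and space filtering with str.partition to split at the first space followed by a separate comprehension filtering spaces from the tail.
import Mathlib
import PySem

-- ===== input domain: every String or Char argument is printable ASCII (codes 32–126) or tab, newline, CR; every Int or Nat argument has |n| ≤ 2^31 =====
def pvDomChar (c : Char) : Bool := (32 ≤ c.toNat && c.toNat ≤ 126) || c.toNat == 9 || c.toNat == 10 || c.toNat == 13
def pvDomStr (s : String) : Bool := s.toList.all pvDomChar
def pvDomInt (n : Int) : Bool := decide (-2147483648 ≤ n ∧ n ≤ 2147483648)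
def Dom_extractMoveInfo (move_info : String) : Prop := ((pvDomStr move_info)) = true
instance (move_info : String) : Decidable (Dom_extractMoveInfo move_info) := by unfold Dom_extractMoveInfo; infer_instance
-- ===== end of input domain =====

-- B splits at the first space (str.partition) and filters the tail in a second pass,
-- instead of A's single counter-driven loop; objective: more idiomatic (same cost).

-- ===== PORT A =====
-- the loop state of A: (space_counter, teamname, temp_arr), recursed over the characters
def extractMoveInfoGo : List Char → Int → String → List String → String × List String
  | [], _, teamname, temp_arr => (teamname, temp_arr)
  | c :: cs, sc, teamname, temp_arr =>
    if c = ' ' then extractMoveInfoGo cs (sc + 1) teamname temp_arr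
    else if sc = 0 then extractMoveInfoGo cs sc (teamname ++ String.ofList [c]) temp_arr
    else extractMoveInfoGo cs sc teamname (temp_arr ++ [String.ofList [c]])

def extractMoveInfo (move_info : String) : String × List String :=
  extractMoveInfoGo move_info.toList 0 "" []

-- ===== PORT B =====
-- partition(" "): before = chars up to the first space, rest = chars after it (empty if no space)
def extractMoveInfo_alt (move_info : String) : String × List String :=
  let l := move_info.toList
  let before := l.takeWhile (fun c => c ≠ ' ')
  let rest := (l.dropWhile (fun c => c ≠ ' ')).drop 1
  (String.ofList before, (rest.filter (fun c => c ≠ ' ')).map (fun c => String.ofList [c]))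

-- ===== PRECONDITION & SPEC =====
def Spec_extractMoveInfo (move_info : String) (out : String × List String) : Prop := out = extractMoveInfo_alt move_info
instance (move_info : String) (out : String × List String) : Decidable (Spec_extractMoveInfo move_info out) := by unfold Spec_extractMoveInfo; infer_instance

-- ===== CLAIM (what is proved, stated in full; the proofs are below) =====
def Claim_equal_extractMoveInfo : Prop := ∀ (move_info : String), Dom_extractMoveInfo move_info → Spec_extractMoveInfo move_info (extractMoveInfo move_info)

-- ===== LEMMAS AND PROOFS =====

-- after the first space (sc ≠ 0), A just filters the remaining chars into temp_arr
theorem extractMoveInfoGo_pos (l : List Char) (sc : Int) (hsc : 0 < sc)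
    (tn : String) (arr : List String) :
    extractMoveInfoGo l sc tn arr
      = (tn, arr ++ (l.filter (fun c => c ≠ ' ')).map (fun c => String.ofList [c])) := by
  induction l generalizing sc arr with
  | nil => simp [extractMoveInfoGo]
  | cons c cs ih =>
    by_cases hc : c = ' '
    · have h1 : 0 < sc + 1 := by omega
      simp [extractMoveInfoGo, hc, ih (sc + 1) h1]
    · have h0 : ¬ sc = 0 := by omega
      simp [extractMoveInfoGo, hc, h0, ih sc hsc]

-- before any space (sc = 0), A accumulates takeWhile into teamname, then filters the rest
theorem extractMoveInfoGo_zero (l : List Char) (tn : String) (arr : List String) :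
    extractMoveInfoGo l 0 tn arr
      = (tn ++ String.ofList (l.takeWhile (fun c => c ≠ ' ')),
         arr ++ ((((l.dropWhile (fun c => c ≠ ' ')).drop 1).filter (fun c => c ≠ ' ')).map
           (fun c => String.ofList [c]))) := by
  induction l generalizing tn with
  | nil => simp [extractMoveInfoGo]
  | cons c cs ih =>
    by_cases hc : c = ' '
    · have h1 := extractMoveInfoGo_pos cs 1 one_pos tn arr
      simp [extractMoveInfoGo, hc, h1]
    · simp only [extractMoveInfoGo, ih,
        List.takeWhile_cons, List.dropWhile_cons, hc]
      simp [hc, String.append_assoc, ← String.ofList_append]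

-- ===== VERDICT (by name: the statement is the Claim_ definition above) =====
theorem extractMoveInfo_spec : Claim_equal_extractMoveInfo := by
  intro s _
  unfold Spec_extractMoveInfo extractMoveInfo extractMoveInfo_alt
  simp [extractMoveInfoGo_zero]
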